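-- pv_equiv track=rewrite | github.com/santivalverde4/Administrador-de-estacionamiento-de-vehiculos | proyecto3_santiagovalverde.py | ajustar_tiempo
-- ===== SOURCE A (Python) =====
-- def ajustar_tiempo(horas, minutos, redondear_hasta):
--     # Asegurarse de que redondear_hasta esté en el rango válido de 0 a 59
--     if redondear_hasta < 0 or redondear_hasta >= 60:
--         raise ValueError("El valor de redondear_hasta debe estar entre 0 y 59 inclusive.")
--
--     # Sumamos minutos hasta que los minutos actuales sean iguales a redondear_hasta
--     while minutos != redondear_hasta:
--         minutos += 1
--         if minutos == 60:
--             minutos = 0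
--             horas += 1
--
--     return horas, minutos
-- ===== SOURCE B (Python) =====
-- def ajustar_tiempo(horas, minutos, redondear_hasta):
--     if redondear_hasta < 0 or redondear_hasta >= 60:
--         raise ValueError("El valor de redondear_hasta debe estar entre 0 y 59 inclusive.")
--     # minutos < 60, so the minute hand wraps past 60 at most once:
--     # exactly when it starts above the target.
--     return horas + (1 if minutos > redondear_hasta else 0), redondear_hasta
-- ===== Notes on version B (the rewrite author's own statement) =====
-- stated objective: faster
-- what changed: replaces the minute-by-minute counting loop with a closed form: minutes become redondear_hasta and hours gain 1 exactly when the start minute exceeds the target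
import Mathlib
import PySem

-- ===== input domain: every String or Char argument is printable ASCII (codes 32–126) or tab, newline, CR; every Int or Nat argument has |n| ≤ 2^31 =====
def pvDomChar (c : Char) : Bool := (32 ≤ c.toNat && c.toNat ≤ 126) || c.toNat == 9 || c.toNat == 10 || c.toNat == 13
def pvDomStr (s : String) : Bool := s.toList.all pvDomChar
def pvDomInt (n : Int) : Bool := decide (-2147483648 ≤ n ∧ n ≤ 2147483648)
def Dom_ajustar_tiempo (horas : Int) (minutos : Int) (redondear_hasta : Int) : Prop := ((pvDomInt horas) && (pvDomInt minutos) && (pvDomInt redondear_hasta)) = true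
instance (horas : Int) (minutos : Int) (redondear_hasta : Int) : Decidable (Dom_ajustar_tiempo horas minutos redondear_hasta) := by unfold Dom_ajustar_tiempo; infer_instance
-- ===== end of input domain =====

-- B replaces A's tick-by-tick minute loop with a closed form (hours gain 1 iff the start
-- minute exceeds the target); Pre_ excludes inputs where A raises or loops forever.


-- ===== PORT A =====
-- the while-loop, with a fuel guard that only makes the recursion total; under Pre_ the
-- fuel given below is never exhausted
def ajustarLoop (fuel : Nat) (horas minutos redondear_hasta : Int) : Int × Int :=
  match fuel with
  | 0 => (horas, minutos)
  | fuel + 1 =>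
    if minutos = redondear_hasta then (horas, minutos)
    else
      let m := minutos + 1
      if m = 60 then ajustarLoop fuel (horas + 1) 0 redondear_hasta
      else ajustarLoop fuel horas m redondear_hasta

def ajustar_tiempo (horas : Int) (minutos : Int) (redondear_hasta : Int) : Int × Int :=
  if redondear_hasta < 0 ∨ redondear_hasta ≥ 60 then (horas, minutos)  -- Python: raise ValueError (excluded by Pre_)
  else ajustarLoop ((redondear_hasta - minutos).toNat + 120) horas minutos redondear_hasta

-- ===== PORT B =====
def ajustar_tiempo_alt (horas : Int) (minutos : Int) (redondear_hasta : Int) : Int × Int :=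
  if redondear_hasta < 0 ∨ redondear_hasta ≥ 60 then (horas, minutos)  -- Python: raise ValueError (excluded by Pre_)
  else (horas + (if minutos > redondear_hasta then 1 else 0), redondear_hasta)

-- ===== PRECONDITION & SPEC =====
-- Pre_ excludes exactly the inputs on which A returns no value: redondear_hasta outside
-- 0..59 (A raises ValueError) and minutos ≥ 60 (A's loop never terminates).
def Pre_ajustar_tiempo (horas : Int) (minutos : Int) (redondear_hasta : Int) : Prop :=
  0 ≤ redondear_hasta ∧ redondear_hasta < 60 ∧ minutos < 60
instance (horas : Int) (minutos : Int) (redondear_hasta : Int) : Decidable (Pre_ajustar_tiempo horas minutos redondear_hasta) := by unfold Pre_ajustar_tiempo; infer_instance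

def pvWitness_ajustar_tiempo : Int × Int × Int := (3, 47, 15)

def Spec_ajustar_tiempo (horas : Int) (minutos : Int) (redondear_hasta : Int) (out : Int × Int) : Prop := out = ajustar_tiempo_alt horas minutos redondear_hasta
instance (horas : Int) (minutos : Int) (redondear_hasta : Int) (out : Int × Int) : Decidable (Spec_ajustar_tiempo horas minutos redondear_hasta out) := by unfold Spec_ajustar_tiempo; infer_instance

-- ===== CLAIM (what is proved, stated in full; the proofs are below) =====
def Claim_equal_ajustar_tiempo : Prop := ∀ (horas : Int) (minutos : Int) (redondear_hasta : Int), Dom_ajustar_tiempo horas minutos redondear_hasta → Pre_ajustar_tiempo horas minutos redondear_hasta → Spec_ajustar_tiempo horas minutos redondear_hasta (ajustar_tiempo horas minutos redondear_hasta)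

-- ===== LEMMAS AND PROOFS =====

-- Phase 1: minutos ≤ redondear_hasta: the loop climbs straight to the target, no wrap.
lemma ajustarLoop_up (fuel : Nat) (horas minutos redondear_hasta : Int)
    (h1 : minutos ≤ redondear_hasta) (h2 : redondear_hasta < 60)
    (hf : (redondear_hasta - minutos).toNat ≤ fuel) :
    ajustarLoop fuel horas minutos redondear_hasta = (horas, redondear_hasta) := by
  induction fuel generalizing minutos with
  | zero =>
    have : minutos = redondear_hasta := by omega
    subst this; simp [ajustarLoop]
  | succ n ih =>
    by_cases he : minutos = redondear_hasta
    · subst he; simp [ajustarLoop]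
    · have hlt : minutos < redondear_hasta := lt_of_le_of_ne h1 he
      have hne60 : minutos + 1 ≠ 60 := by omega
      simp only [ajustarLoop, if_neg he, if_neg hne60]
      exact ih (minutos + 1) (by omega) (by omega)

-- Phase 2: redondear_hasta < minutos < 60: the loop climbs to 60, wraps once, then phase 1.
lemma ajustarLoop_wrap (fuel : Nat) (horas minutos redondear_hasta : Int)
    (h0 : 0 ≤ redondear_hasta) (h1 : redondear_hasta < minutos) (h2 : minutos < 60)
    (hf : (60 - minutos).toNat + redondear_hasta.toNat ≤ fuel) :
    ajustarLoop fuel horas minutos redondear_hasta = (horas + 1, redondear_hasta) := by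
  induction fuel generalizing minutos with
  | zero => omega
  | succ n ih =>
    have he : minutos ≠ redondear_hasta := by omega
    by_cases h60 : minutos + 1 = 60
    · simp only [ajustarLoop, if_neg he, if_pos h60]
      exact ajustarLoop_up n (horas + 1) 0 redondear_hasta h0 (by omega) (by omega)
    · simp only [ajustarLoop, if_neg he, if_neg h60]
      exact ih (minutos + 1) (by omega) (by omega) (by omega)

-- ===== VERDICT (by name: the statement is the Claim_ definition above) =====
theorem ajustar_tiempo_spec : Claim_equal_ajustar_tiempo := by
  intro horas minutos redondear_hasta _ hpre
  obtain ⟨h0, h1, h2⟩ := hpre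
  unfold Spec_ajustar_tiempo ajustar_tiempo ajustar_tiempo_alt
  have hrange : ¬ (redondear_hasta < 0 ∨ redondear_hasta ≥ 60) := by omega
  simp only [if_neg hrange]
  by_cases hle : minutos ≤ redondear_hasta
  · rw [ajustarLoop_up _ _ _ _ hle h1 (by omega)]
    simp [not_lt.mpr hle]
  · push_neg at hle
    rw [ajustarLoop_wrap _ _ _ _ h0 hle h2 (by omega)]
    simp [hle]
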